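-- pv_equiv track=rewrite | github.com/ANSI-D/haiku-generator | haiku_generator.py | _heuristic_syllable_count
-- ===== SOURCE A (Python) =====
-- def _heuristic_syllable_count(word):
--     """
--     Heuristic syllable counting for words not in CMUdict.
--     Based on vowel groups.
--     """
--     if not word:
--         return 0
--
--     word = word.lower()
--     vowels = "aeiouy"
--     syllable_count = 0
--     previous_was_vowel = False
--
--     for char in word:
--         is_vowel = char in vowels
--         if is_vowel and not previous_was_vowel:
--             syllable_count += 1
--         previous_was_vowel = is_vowel
--
--     # Adjust for silent "e" at the end
--     if word.endswith('e') and syllable_count > 1: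
--         syllable_count -= 1
--
--     # Make sure we return at least 1
--     return max(1, syllable_count)
-- ===== SOURCE B (Python) =====
-- def _heuristic_syllable_count(word):
--     """Arithmetic identity: #vowel-runs = #vowels - #adjacent vowel-vowel pairs."""
--     if not word:
--         return 0
--     word = word.lower()
--     vowels = "aeiouy"
--     v = sum(c in vowels for c in word)
--     vv = sum(a in vowels and b in vowels for a, b in zip(word, word[1:]))
--     syllable_count = v - vv
--     if word.endswith('e') and syllable_count > 1:
--         syllable_count -= 1
--     return max(1, syllable_count)
-- ===== Notes on version B (the rewrite author's own statement) =====
-- stated objective: alternative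
-- what changed: Replaces A's sequential previous_was_vowel state machine with an arithmetic identity: syllables = (count of vowel characters) minus (count of adjacent vowel-vowel pairs in zip(word, word[1:])), then the same silent-e and max(1,..) tail.
import Mathlib
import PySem

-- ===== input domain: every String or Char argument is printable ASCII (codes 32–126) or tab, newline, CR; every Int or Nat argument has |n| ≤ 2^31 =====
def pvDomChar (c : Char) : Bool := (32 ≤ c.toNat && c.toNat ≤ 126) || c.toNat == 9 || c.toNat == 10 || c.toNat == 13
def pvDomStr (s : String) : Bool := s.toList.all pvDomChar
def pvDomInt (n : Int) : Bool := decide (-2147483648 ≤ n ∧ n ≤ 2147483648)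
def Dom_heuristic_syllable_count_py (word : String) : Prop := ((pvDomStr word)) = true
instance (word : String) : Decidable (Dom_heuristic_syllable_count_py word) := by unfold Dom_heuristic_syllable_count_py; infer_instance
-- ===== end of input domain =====

-- B replaces A's previous_was_vowel state machine by the arithmetic identity
-- syllables = #vowel chars - #adjacent vowel-vowel pairs; objective: alternative.

-- ===== PORT A =====
-- 'char in "aeiouy"' for a single char = membership in the vowel characters
def pvVowels : List Char := ['a', 'e', 'i', 'o', 'u', 'y']

-- the for-loop: state (syllable_count, previous_was_vowel)
def pvLoopA : List Char → Int → Bool → Int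
  | [], cnt, _ => cnt
  | c :: t, cnt, prev =>
    let isV : Bool := c ∈ pvVowels
    pvLoopA t (if isV && !prev then cnt + 1 else cnt) isV

def heuristic_syllable_count_py (word : String) : Int :=
  if word.toList = [] then 0
  else
    let w := PySem.Chars.lower word.toList
    let sc := pvLoopA w 0 false
    let sc := if PySem.Chars.endswith w ['e'] && decide (sc > 1) then sc - 1 else sc
    max 1 sc

-- ===== PORT B =====
def pvIsV (c : Char) : Bool := c ∈ pvVowels

-- sum(c in vowels for c in word)
def pvCntV (l : List Char) : Int := (l.countP pvIsV : Nat)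

-- sum(a in vowels and b in vowels for a, b in zip(word, word[1:]))
def pvCntVV (l : List Char) : Int :=
  ((l.zip l.tail).countP (fun p => pvIsV p.1 && pvIsV p.2) : Nat)

def heuristic_syllable_count_py_alt (word : String) : Int :=
  if word.toList = [] then 0
  else
    let w := PySem.Chars.lower word.toList
    let sc := pvCntV w - pvCntVV w
    let sc := if PySem.Chars.endswith w ['e'] && decide (sc > 1) then sc - 1 else sc
    max 1 sc

-- ===== PRECONDITION & SPEC =====
def Spec_heuristic_syllable_count_py (word : String) (out : Int) : Prop := out = heuristic_syllable_count_py_alt word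
instance (word : String) (out : Int) : Decidable (Spec_heuristic_syllable_count_py word out) := by unfold Spec_heuristic_syllable_count_py; infer_instance

-- ===== CLAIM (what is proved, stated in full; the proofs are below) =====
def Claim_equal_heuristic_syllable_count_py : Prop := ∀ (word : String), Dom_heuristic_syllable_count_py word → Spec_heuristic_syllable_count_py word (heuristic_syllable_count_py word)

-- ===== LEMMAS AND PROOFS =====

-- 1 if the list starts with a vowel, else 0 (proof-only helper)
def pvHd : List Char → Int
  | [] => 0
  | c :: _ => if pvIsV c then 1 else 0

-- A's state machine computes #vowels - #adjacent vowel pairs; with prev = true the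
-- leading run's first vowel was already counted, hence the extra pvHd correction.
theorem pvLoopA_eq : ∀ (l : List Char) (cnt : Int),
    pvLoopA l cnt false = cnt + pvCntV l - pvCntVV l ∧
    pvLoopA l cnt true = cnt + pvCntV l - pvCntVV l - pvHd l := by
  intro l
  induction l with
  | nil => intro cnt; simp [pvLoopA, pvCntV, pvCntVV, pvHd]
  | cons c t ih =>
    intro cnt
    have hV : pvCntV (c :: t) = (if pvIsV c then 1 else 0) + pvCntV t := by
      by_cases h : pvIsV c <;> simp [pvCntV, h]; ring
    have hVV : pvCntVV (c :: t) = (if pvIsV c then pvHd t else 0) + pvCntVV t := by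
      cases t with
      | nil => simp [pvCntVV, pvHd]
      | cons b t' =>
        by_cases hc : pvIsV c <;> by_cases hb : pvIsV b <;>
          simp [pvCntVV, pvHd, hc, hb]; ring
    by_cases h : pvIsV c
    · have hm : decide (c ∈ pvVowels) = true := by simpa [pvIsV] using h
      constructor
      · simp only [pvLoopA, hm, Bool.not_false, Bool.and_true, if_true]
        rw [(ih (cnt + 1)).2, hV, hVV, if_pos h, if_pos h]
        ring
      · simp only [pvLoopA, hm, Bool.not_true, Bool.and_false, Bool.false_eq_true, if_false]
        rw [(ih cnt).2, hV, hVV, if_pos h, if_pos h, pvHd, if_pos h]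
        ring
    · have hm : decide (c ∈ pvVowels) = false := by simpa [pvIsV] using h
      constructor
      · simp only [pvLoopA, hm, Bool.false_and, Bool.false_eq_true, if_false]
        rw [(ih cnt).1, hV, hVV, if_neg h, if_neg h]
        ring
      · simp only [pvLoopA, hm, Bool.false_and, Bool.false_eq_true, if_false]
        rw [(ih cnt).1, hV, hVV, if_neg h, if_neg h, pvHd, if_neg h]
        ring

-- ===== VERDICT (by name: the statement is the Claim_ definition above) =====
theorem heuristic_syllable_count_py_spec : Claim_equal_heuristic_syllable_count_py := by
  intro word _
  unfold Spec_heuristic_syllable_count_py heuristic_syllable_count_py heuristic_syllable_count_py_alt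
  by_cases h : word.toList = []
  · simp [h]
  · simp only [if_neg h]
    rw [show pvLoopA (PySem.Chars.lower word.toList) 0 false
          = pvCntV (PySem.Chars.lower word.toList) - pvCntVV (PySem.Chars.lower word.toList) from by
        have := (pvLoopA_eq (PySem.Chars.lower word.toList) 0).1; linarith]
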